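-- pv_equiv track=rewrite | github.com/Dan-Burns/ChACRA | chacra/average.py | get_representative_pair_name
-- ===== SOURCE A (Python) =====
-- def get_representative_pair_name(chaina, chainb, identical_subunits,
--                                  representative_chains, equivalent_interactions):
--     '''
--     provide the chains from the contact and get the chain names to use for
--     making a generalized/averaged contact name
--     '''
--     representative_pair = None
--     if chaina == chainb:
--         for key, identical_subunit_list in identical_subunits.items():
--             if chaina in identical_subunit_list:
--                 for representative_chain in representative_chains:
--                         if representative_chain in identical_subunit_list:
--                             representative_pair = (representative_chain,
--                                                     representative_chain)
--
--     # determine which equivalent_interaction set it came from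
--     else:
--         paira = (chaina,chainb)
--
--         for representative_pair_name, equivalent_interaction_list in \
--         equivalent_interactions.items():
--             for pair in equivalent_interaction_list:
--                 # The current version maintains the relationship
--                 # rather than being alphabetical like the incoming contact
--                 # so have to sort pair
--                 if paira == pair:
--                         representative_pair = representative_pair_name
--
--                         break
--     if representative_pair is None:
--         raise ValueError(f"Could not determine representative_pair for ({chaina}, {chainb})")
--
--     return representative_pair
-- ===== SOURCE B (Python) =====
-- def get_representative_pair_name(chaina, chainb, identical_subunits,
--                                  representative_chains, equivalent_interactions):
--     '''
--     Index-then-lookup: build a dictionary mapping every chain (resp. chain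
--     pair) to its representative once, then answer with a single .get().
--     Dict insertion overwrite reproduces the original's last-match-wins.
--     '''
--     if chaina == chainb:
--         chain_to_rc = {}
--         for subunit_list in identical_subunits.values():
--             rc_hits = [rc for rc in representative_chains if rc in subunit_list]
--             if rc_hits:
--                 for c in subunit_list:
--                     chain_to_rc[c] = rc_hits[-1]
--         rc = chain_to_rc.get(chaina)
--         representative_pair = None if rc is None else (rc, rc)
--     else:
--         pair_to_name = {pair: name
--                         for name, pair_list in equivalent_interactions.items()
--                         for pair in pair_list}
--         representative_pair = pair_to_name.get((chaina, chainb))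
--     if representative_pair is None:
--         raise ValueError(f"Could not determine representative_pair for ({chaina}, {chainb})")
--     return representative_pair
-- ===== Notes on version B (the rewrite author's own statement) =====
-- stated objective: alternative
-- what changed: A answers each query by nested scans over the dicts with last-match-wins overwriting; B first builds an index dictionary (pair->name, resp. chain->representative chain, where dict-insert overwrite reproduces last-match-wins) and then answers with a single .get() lookup.
import Mathlib
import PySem

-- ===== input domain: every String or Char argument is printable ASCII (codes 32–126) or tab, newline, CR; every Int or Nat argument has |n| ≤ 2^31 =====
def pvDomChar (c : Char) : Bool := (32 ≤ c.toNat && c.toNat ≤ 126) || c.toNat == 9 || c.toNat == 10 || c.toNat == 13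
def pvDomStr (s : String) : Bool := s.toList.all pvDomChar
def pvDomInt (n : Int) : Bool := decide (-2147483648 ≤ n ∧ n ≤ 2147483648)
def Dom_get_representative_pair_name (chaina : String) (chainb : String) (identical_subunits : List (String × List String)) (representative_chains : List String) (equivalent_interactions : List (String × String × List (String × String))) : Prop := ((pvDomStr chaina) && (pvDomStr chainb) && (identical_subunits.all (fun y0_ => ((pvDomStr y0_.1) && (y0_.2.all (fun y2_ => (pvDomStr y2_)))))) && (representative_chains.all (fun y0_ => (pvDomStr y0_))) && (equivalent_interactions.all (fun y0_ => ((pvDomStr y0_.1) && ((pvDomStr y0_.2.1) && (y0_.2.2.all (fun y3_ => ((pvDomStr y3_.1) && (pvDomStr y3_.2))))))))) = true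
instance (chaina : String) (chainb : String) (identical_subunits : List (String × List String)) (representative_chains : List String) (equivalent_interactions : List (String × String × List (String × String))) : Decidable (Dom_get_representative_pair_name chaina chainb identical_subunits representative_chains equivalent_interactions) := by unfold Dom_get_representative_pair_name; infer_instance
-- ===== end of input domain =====

-- B builds an index dictionary once (pair -> name, resp. chain -> representative chain,
-- dict overwrite reproducing A's last-match-wins) and answers by one lookup (objective: alternative).

-- ===== PORT A =====
-- inner 'for pair in equivalent_interaction_list: if paira == pair: … break'
def aFindPair (paira : String × String) (lst : List (String × String))
    (name : String × String) (acc : Option (String × String)) : Option (String × String) :=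
  match lst with
  | [] => acc
  | p :: rest => if paira == p then some name else aFindPair paira rest name acc

def get_representative_pair_name (chaina : String) (chainb : String) (identical_subunits : List (String × List String)) (representative_chains : List String) (equivalent_interactions : List (String × String × List (String × String))) : String × String :=
  let representative_pair : Option (String × String) :=
    if chaina == chainb then
      identical_subunits.foldl (fun acc e =>
        if e.2.contains chaina then
          representative_chains.foldl (fun a rc =>
            if e.2.contains rc then some (rc, rc) else a) acc
        else acc) none
    else
      let paira := (chaina, chainb)
      equivalent_interactions.foldl (fun acc e =>
        aFindPair paira e.2.2 (e.1, e.2.1) acc) none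
  match representative_pair with
  | some p => p
  | none => ("", "")  -- Python raises ValueError here; excluded by Pre_

-- ===== PORT B =====
-- 'chain_to_rc = {}; for subunit_list in …: rc_hits = […]; if rc_hits: for c in subunit_list: chain_to_rc[c] = rc_hits[-1]'
def bChainIndex (representative_chains : List String)
    (identical_subunits : List (String × List String)) : PySem.Dict String String :=
  identical_subunits.foldl (fun d e =>
    let rc_hits := representative_chains.filter (fun rc => e.2.contains rc)
    match rc_hits.getLast? with
    | some last => e.2.foldl (fun d c => d.insert c last) d
    | none => d) PySem.Dict.empty

-- 'pair_to_name = {pair: name for name, pair_list in … for pair in pair_list}'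
def bPairIndex (equivalent_interactions : List (String × String × List (String × String))) :
    PySem.Dict (String × String) (String × String) :=
  equivalent_interactions.foldl (fun d e =>
    e.2.2.foldl (fun d p => d.insert p (e.1, e.2.1)) d) PySem.Dict.empty

def get_representative_pair_name_alt (chaina : String) (chainb : String) (identical_subunits : List (String × List String)) (representative_chains : List String) (equivalent_interactions : List (String × String × List (String × String))) : String × String :=
  let representative_pair : Option (String × String) :=
    if chaina == chainb then
      match (bChainIndex representative_chains identical_subunits).get? chaina with
      | some rc => some (rc, rc)
      | none => none
    else
      (bPairIndex equivalent_interactions).get? (chaina, chainb)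
  match representative_pair with
  | some p => p
  | none => ("", "")  -- Python raises ValueError here; excluded by Pre_

-- ===== PRECONDITION & SPEC =====
-- Pre_ excludes exactly the inputs on which Python A (and B) raise ValueError: no match found.
def Pre_get_representative_pair_name (chaina : String) (chainb : String) (identical_subunits : List (String × List String)) (representative_chains : List String) (equivalent_interactions : List (String × String × List (String × String))) : Prop :=
  (chaina = chainb ∧ ∃ e ∈ identical_subunits, chaina ∈ e.2 ∧ ∃ rc ∈ representative_chains, rc ∈ e.2) ∨
  (chaina ≠ chainb ∧ ∃ e ∈ equivalent_interactions, (chaina, chainb) ∈ e.2.2)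
instance (chaina : String) (chainb : String) (identical_subunits : List (String × List String)) (representative_chains : List String) (equivalent_interactions : List (String × String × List (String × String))) : Decidable (Pre_get_representative_pair_name chaina chainb identical_subunits representative_chains equivalent_interactions) := by unfold Pre_get_representative_pair_name; infer_instance

def pvWitness_get_representative_pair_name : String × String × (List (String × List String)) × List String × (List (String × String × List (String × String))) :=
  ("A", "A", [("k", ["A", "B"])], ["A"], [])

def Spec_get_representative_pair_name (chaina : String) (chainb : String) (identical_subunits : List (String × List String)) (representative_chains : List String) (equivalent_interactions : List (String × String × List (String × String))) (out : String × String) : Prop := out = get_representative_pair_name_alt chaina chainb identical_subunits representative_chains equivalent_interactions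
instance (chaina : String) (chainb : String) (identical_subunits : List (String × List String)) (representative_chains : List String) (equivalent_interactions : List (String × String × List (String × String))) (out : String × String) : Decidable (Spec_get_representative_pair_name chaina chainb identical_subunits representative_chains equivalent_interactions out) := by unfold Spec_get_representative_pair_name; infer_instance

-- ===== CLAIM (what is proved, stated in full; the proofs are below) =====
def Claim_equal_get_representative_pair_name : Prop := ∀ (chaina : String) (chainb : String) (identical_subunits : List (String × List String)) (representative_chains : List String) (equivalent_interactions : List (String × String × List (String × String))), Dom_get_representative_pair_name chaina chainb identical_subunits representative_chains equivalent_interactions → Pre_get_representative_pair_name chaina chainb identical_subunits representative_chains equivalent_interactions → Spec_get_representative_pair_name chaina chainb identical_subunits representative_chains equivalent_interactions (get_representative_pair_name chaina chainb identical_subunits representative_chains equivalent_interactions)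

-- ===== LEMMAS AND PROOFS =====

-- A's break-loop over one equivalent_interaction_list is a membership test.
theorem aFindPair_eq (paira : String × String) (lst : List (String × String))
    (name : String × String) (acc : Option (String × String)) :
    aFindPair paira lst name acc = if lst.contains paira then some name else acc := by
  induction lst with
  | nil => simp [aFindPair]
  | cons p rest ih =>
    simp only [aFindPair, ih, List.contains_cons]
    by_cases h : paira = p
    · subst h; simp
    · simp [h]

-- inserting the same value for every key of a list: lookup afterwards.
theorem get?_foldl_insert_const {κ ν : Type} [BEq κ] [LawfulBEq κ] [DecidableEq κ]
    (l : List κ) (v : ν) (d : PySem.Dict κ ν) (k : κ) :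
    (l.foldl (fun d c => d.insert c v) d).get? k =
      if k ∈ l then some v else d.get? k := by
  induction l generalizing d with
  | nil => simp
  | cons c rest ih =>
    simp only [List.foldl_cons, ih, PySem.Dict.get?_insert, List.mem_cons]
    by_cases hr : k ∈ rest
    · simp [hr]
    · by_cases hc : k = c <;> simp [hr, hc]

-- lookup in B's pair index = A's overwrite fold over equivalent_interactions.
theorem pair_index_get (paira : String × String)
    (eqi : List (String × String × List (String × String)))
    (d : PySem.Dict (String × String) (String × String)) :
    (eqi.foldl (fun d e => e.2.2.foldl (fun d p => d.insert p (e.1, e.2.1)) d) d).get? paira =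
      eqi.foldl (fun acc e => if e.2.2.contains paira then some (e.1, e.2.1) else acc)
        (d.get? paira) := by
  induction eqi generalizing d with
  | nil => rfl
  | cons e rest ih =>
    simp only [List.foldl_cons, ih, get?_foldl_insert_const, List.contains_eq_mem]
    by_cases h : paira ∈ e.2.2 <;> simp [h]

-- A's inner overwrite over representative_chains = last element of the filtered list.
theorem inner_overwrite_eq (lst : List String) (rcs : List String)
    (acc : Option (String × String)) :
    rcs.foldl (fun a rc => if lst.contains rc then some (rc, rc) else a) acc =
      (match (rcs.filter (fun rc => lst.contains rc)).getLast? with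
       | some rc => some (rc, rc)
       | none => acc) := by
  induction rcs generalizing acc with
  | nil => simp
  | cons rc rest ih =>
    rw [List.foldl_cons, ih, List.filter_cons]
    by_cases h : lst.contains rc
    · simp only [if_pos h, List.getLast?_cons]
      cases hl : (rest.filter (fun rc => lst.contains rc)).getLast? <;> rfl
    · simp only [if_neg h]

-- lookup in B's chain index = A's overwrite fold over identical_subunits (value transported by rc ↦ (rc, rc)).
theorem chain_index_get (chaina : String) (rcs : List String)
    (isu : List (String × List String)) (d : PySem.Dict String String) :
    (isu.foldl (fun d e =>
        let rc_hits := rcs.filter (fun rc => e.2.contains rc)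
        match rc_hits.getLast? with
        | some last => e.2.foldl (fun d c => d.insert c last) d
        | none => d) d).get? chaina =
      isu.foldl (fun o e =>
        match (rcs.filter (fun rc => e.2.contains rc)).getLast? with
        | some last => if e.2.contains chaina then some last else o
        | none => o) (d.get? chaina) := by
  induction isu generalizing d with
  | nil => rfl
  | cons e rest ih =>
    simp only [List.foldl_cons, ih]
    cases hl : (rcs.filter (fun rc => e.2.contains rc)).getLast? with
    | some last =>
      simp only [get?_foldl_insert_const, List.contains_eq_mem]
      by_cases h : chaina ∈ e.2 <;> simp [h]
    | none => rfl

-- A's fold over identical_subunits = the Option-String fold, values doubled.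
theorem a_subunit_fold_eq (chaina : String) (rcs : List String)
    (isu : List (String × List String)) (o : Option String) :
    isu.foldl (fun acc e =>
        if e.2.contains chaina then
          rcs.foldl (fun a rc => if e.2.contains rc then some (rc, rc) else a) acc
        else acc) (o.map (fun rc => (rc, rc))) =
      (isu.foldl (fun o e =>
        match (rcs.filter (fun rc => e.2.contains rc)).getLast? with
        | some last => if e.2.contains chaina then some last else o
        | none => o) o).map (fun rc => (rc, rc)) := by
  induction isu generalizing o with
  | nil => rfl
  | cons e rest ih =>
    rw [List.foldl_cons, List.foldl_cons, inner_overwrite_eq]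
    by_cases h : e.2.contains chaina
    · rw [if_pos h]
      cases hl : (rcs.filter (fun rc => e.2.contains rc)).getLast? with
      | some last =>
        have h' : chaina ∈ e.2 := by simpa using h
        simpa [h'] using ih (some last)
      | none => simpa using ih o
    · rw [if_neg h]
      have h' : chaina ∉ e.2 := by simpa using h
      cases hl : (rcs.filter (fun rc => e.2.contains rc)).getLast? with
      | some last => simpa [h'] using ih o
      | none => simpa using ih o

-- A's fold over equivalent_interactions, with each aFindPair break-loop as a membership test.
theorem a_pair_fold_eq (paira : String × String)
    (eqi : List (String × String × List (String × String)))
    (acc : Option (String × String)) :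
    eqi.foldl (fun acc e => aFindPair paira e.2.2 (e.1, e.2.1) acc) acc
      = eqi.foldl (fun acc e => if e.2.2.contains paira then some (e.1, e.2.1) else acc) acc := by
  induction eqi generalizing acc with
  | nil => rfl
  | cons e rest ih => rw [List.foldl_cons, List.foldl_cons, aFindPair_eq, ih]

-- ===== VERDICT (by name: the statement is the Claim_ definition above) =====
theorem get_representative_pair_name_spec : Claim_equal_get_representative_pair_name := by
  intro chaina chainb isu rcs eqi _ _
  unfold Spec_get_representative_pair_name
  unfold get_representative_pair_name get_representative_pair_name_alt bChainIndex bPairIndex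
  by_cases h : chaina == chainb
  · simp only [h, if_true]
    have := a_subunit_fold_eq chaina rcs isu none
    simp only [Option.map_none] at this
    rw [this, chain_index_get]
    simp only [PySem.Dict.get?_empty]
    generalize (isu.foldl (fun o e =>
        match (rcs.filter (fun rc => e.2.contains rc)).getLast? with
        | some last => if e.2.contains chaina then some last else o
        | none => o) none) = r
    cases r <;> rfl
  · simp only [h, Bool.false_eq_true, if_false]
    have hp := pair_index_get (chaina, chainb) eqi PySem.Dict.empty
    simp only [PySem.Dict.get?_empty] at hp
    rw [hp, a_pair_fold_eq]
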